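-- pv_equiv track=rewrite | github.com/KarKhaldi/Projet_SDP | model/generate_model.py | get_non_dominated_solutions
-- ===== SOURCE A (Python) =====
-- def get_non_dominated_solutions(solution_reduite):
--     # get the objective values
--     obj_val = list(solution_reduite.keys())
--     # get the number of solutions
--     nb_sol = len(solution_reduite)
--     # get the number of objectives
--     nb_obj = 3
--     # get the index of the solutions that are non dominated
--     non_dominated_solutions = {}
--     for i in range(nb_sol):
--         dominated = False
--         for j in range(nb_sol):
--             if i != j:
--                 if all(obj_val[i][k] >= obj_val[j][k] for k in range(nb_obj-1)) and obj_val[i][nb_obj-1] <= obj_val[j][nb_obj-1]: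
--                     dominated = True
--         if not dominated:
--             non_dominated_solutions[obj_val[i]] = solution_reduite[obj_val[i]]
--     return non_dominated_solutions
-- ===== SOURCE B (Python) =====
-- # B: sort-and-sweep 3D skyline. Sort points by (k[0], k[1], -k[2]); sweep keeping the
-- # Pareto staircase of (k[1], -k[2]) pairs seen so far; each point is dominated iff the
-- # staircase query hits or its objective triple occurs more than once.
--
-- def _upper(stair, v):
--     # first index with stair[idx][0] > v (binary search)
--     lo, hi = 0, len(stair)
--     while lo < hi:
--         mid = (lo + hi) // 2
--         if stair[mid][0] <= v:
--             lo = mid + 1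
--         else:
--             hi = mid
--     return lo
--
--
-- def _lower(stair, v):
--     # first index with stair[idx][0] >= v (binary search)
--     lo, hi = 0, len(stair)
--     while lo < hi:
--         mid = (lo + hi) // 2
--         if stair[mid][0] < v:
--             lo = mid + 1
--         else:
--             hi = mid
--     return lo
--
--
-- def get_non_dominated_solutions(solution_reduite):
--     items = list(solution_reduite.items())
--     ts = [(k[0], k[1], -k[2]) for (k, _v) in items]
--     cnt = {}
--     for t in ts:
--         cnt[t] = cnt.get(t, 0) + 1
--     dominated = [False] * len(items)
--     stair = []  # (b, d) pairs: b strictly increasing, d strictly decreasing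
--     for (i, t) in sorted(enumerate(ts), key=lambda e: e[1]):
--         b, d = t[1], t[2]
--         pos = _upper(stair, b) - 1
--         hit = pos >= 0 and stair[pos][1] <= d
--         if hit or cnt[t] > 1:
--             dominated[i] = True
--         if not hit:
--             lo = _lower(stair, b)
--             hi = lo
--             while hi < len(stair) and stair[hi][1] >= d:
--                 hi += 1
--             stair[lo:hi] = [(b, d)]
--     out = {}
--     for i, (k, v) in enumerate(items):
--         if not dominated[i]:
--             out[k] = v
--     return out
-- ===== Notes on version B (the rewrite author's own statement) =====
-- stated objective: faster
-- what changed: A compares every pair of solutions (all-pairs dominance scan); B sorts the objective triples by (k[0], k[1], -k[2]) once and sweeps them, answering each dominance test by binary search against a Pareto staircase of the other two objectives, with a triple-multiplicity counter handling duplicated triples.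
-- outside the precondition, e.g. on get_non_dominated_solutions({(0, 1): [1], (1, 0): [2]}): A returns {(0, 1): [1], (1, 0): [2]}, B raises IndexError
import Mathlib
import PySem

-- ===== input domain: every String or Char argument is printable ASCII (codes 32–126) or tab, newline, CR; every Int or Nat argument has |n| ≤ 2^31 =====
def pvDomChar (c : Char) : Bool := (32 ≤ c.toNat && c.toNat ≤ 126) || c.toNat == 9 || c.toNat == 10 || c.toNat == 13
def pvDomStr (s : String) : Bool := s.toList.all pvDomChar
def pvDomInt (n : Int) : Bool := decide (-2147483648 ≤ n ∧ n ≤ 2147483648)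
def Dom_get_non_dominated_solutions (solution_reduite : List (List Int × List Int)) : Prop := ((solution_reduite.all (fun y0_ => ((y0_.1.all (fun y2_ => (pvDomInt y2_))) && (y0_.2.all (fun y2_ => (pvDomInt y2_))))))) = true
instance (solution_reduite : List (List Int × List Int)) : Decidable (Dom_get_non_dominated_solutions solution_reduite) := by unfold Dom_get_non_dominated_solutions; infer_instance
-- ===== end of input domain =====

-- B replaces A's all-pairs O(n^2) dominance scan by a sort-and-sweep skyline: points sorted by
-- (k[0], k[1], -k[2]), a Pareto staircase over the other two objectives answers each dominance
-- test by binary search.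

-- B replaces A's all-pairs O(n^2) dominance scan by a sort-and-sweep 3D skyline: points are
-- sorted by (k[0], k[1], -k[2]) and a Pareto staircase over the last two objectives, queried by
-- binary search, answers each dominance test.

-- ===== PORT A =====
-- inner dominance test: all(obj_val[i][k] >= obj_val[j][k] for k in range(nb_obj-1)) and obj_val[i][nb_obj-1] <= obj_val[j][nb_obj-1]
def pvADomCond (obj_val : List (List Int)) (nb_obj i j : Int) : Bool :=
  ((PySem.List.pyRange 0 (nb_obj - 1) 1).all fun k =>
      decide (PySem.List.pyGetD (PySem.List.pyGetD obj_val i []) k 0 ≥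
              PySem.List.pyGetD (PySem.List.pyGetD obj_val j []) k 0))
  && decide (PySem.List.pyGetD (PySem.List.pyGetD obj_val i []) (nb_obj - 1) 0 ≤
             PySem.List.pyGetD (PySem.List.pyGetD obj_val j []) (nb_obj - 1) 0)

-- the inner 'for j in range(nb_sol)' loop computing 'dominated'
def pvADominatedLoop (obj_val : List (List Int)) (nb_sol nb_obj i : Int) : Bool :=
  (PySem.List.pyRange 0 nb_sol 1).foldl (fun dom j =>
    if i ≠ j then if pvADomCond obj_val nb_obj i j then true else dom else dom) false

def get_non_dominated_solutions (solution_reduite : List (List Int × List Int)) : List (List Int × List Int) :=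
  let d := PySem.Dict.ofList solution_reduite
  let obj_val := d.keys
  let nb_sol : Int := PySem.List.len obj_val
  let nb_obj : Int := 3
  let nds := (PySem.List.pyRange 0 nb_sol 1).foldl (fun nd i =>
    let dominated := pvADominatedLoop obj_val nb_sol nb_obj i
    if !dominated then
      nd.insert (PySem.List.pyGetD obj_val i []) (d.getD (PySem.List.pyGetD obj_val i []) [])
    else nd) PySem.Dict.empty
  nds.items

-- ===== PORT B =====
-- _upper(stair, v): first index with stair[idx][0] > v (hand-written binary search in Source B)
def pvUpperAux (stair : List (Int × Int)) (v lo hi : Int) : Int :=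
  if h : lo < hi then
    let mid := PySem.Int.floordiv (lo + hi) 2
    if (PySem.List.pyGetD stair mid (0, 0)).1 ≤ v then pvUpperAux stair v (mid + 1) hi
    else pvUpperAux stair v lo mid
  else lo
termination_by (hi - lo).toNat
decreasing_by
  all_goals
    have h2 := (PySem.Int.floordiv_eq_iff_of_pos (a := lo + hi) (b := 2) (q := PySem.Int.floordiv (lo + hi) 2) (by omega)).mp rfl
    omega

def pvUpper (stair : List (Int × Int)) (v : Int) : Int :=
  pvUpperAux stair v 0 (PySem.List.len stair)

-- _lower(stair, v): first index with stair[idx][0] >= v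
def pvLowerAux (stair : List (Int × Int)) (v lo hi : Int) : Int :=
  if h : lo < hi then
    let mid := PySem.Int.floordiv (lo + hi) 2
    if (PySem.List.pyGetD stair mid (0, 0)).1 < v then pvLowerAux stair v (mid + 1) hi
    else pvLowerAux stair v lo mid
  else lo
termination_by (hi - lo).toNat
decreasing_by
  all_goals
    have h2 := (PySem.Int.floordiv_eq_iff_of_pos (a := lo + hi) (b := 2) (q := PySem.Int.floordiv (lo + hi) 2) (by omega)).mp rfl
    omega

def pvLower (stair : List (Int × Int)) (v : Int) : Int :=
  pvLowerAux stair v 0 (PySem.List.len stair)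

-- 'while hi < len(stair) and stair[hi][1] >= d: hi += 1'
def pvPruneHi (stair : List (Int × Int)) (d hi : Int) : Int :=
  if h : hi < PySem.List.len stair ∧ d ≤ (PySem.List.pyGetD stair hi (0, 0)).2 then
    pvPruneHi stair d (hi + 1)
  else hi
termination_by (PySem.List.len stair - hi).toNat
decreasing_by simp [PySem.List.len_eq] at h ⊢; omega

-- sort key: Python compares the tuples (a, b, d) lexicographically
def pvKey (e : Int × (Int × Int × Int)) : Lex (Int × Lex (Int × Int)) :=
  toLex (e.2.1, toLex (e.2.2.1, e.2.2.2))

-- one iteration of the sweep loop body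
def pvSweepStep (cnt : PySem.Dict (Int × Int × Int) Int)
    (s : List Bool × List (Int × Int)) (e : Int × (Int × Int × Int)) :
    List Bool × List (Int × Int) :=
  let dominated := s.1
  let stair := s.2
  let b := e.2.2.1
  let d := e.2.2.2
  let pos := pvUpper stair b - 1
  let hit := decide (0 ≤ pos) && decide ((PySem.List.pyGetD stair pos (0, 0)).2 ≤ d)
  let dominated := if hit || decide (1 < cnt.getD e.2 0) then dominated.set e.1.toNat true else dominated
  let stair :=
    if !hit then
      let lo := pvLower stair b
      let hi := pvPruneHi stair d lo
      stair.take lo.toNat ++ [(b, d)] ++ stair.drop hi.toNat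
    else stair
  (dominated, stair)

def get_non_dominated_solutions_alt (solution_reduite : List (List Int × List Int)) : List (List Int × List Int) :=
  let items := (PySem.Dict.ofList solution_reduite).items
  let ts := items.map (fun p =>
    (PySem.List.pyGetD p.1 0 0, PySem.List.pyGetD p.1 1 0, -(PySem.List.pyGetD p.1 2 0)))
  let cnt := ts.foldl (fun c t => c.insert t (c.getD t 0 + 1))
    (PySem.Dict.empty : PySem.Dict (Int × Int × Int) Int)
  let st := (PySem.List.sorted (PySem.List.enumerate ts) pvKey false).foldl
    (pvSweepStep cnt) (List.replicate items.length false, [])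
  let dominated := st.1
  ((PySem.List.enumerate items).foldl
    (fun out e => if !(PySem.List.pyGetD dominated e.1 false) then out.insert e.2.1 e.2.2 else out)
    PySem.Dict.empty).items

-- ===== PRECONDITION & SPEC =====
-- Pre_ excludes inputs with a key of fewer than 3 ints: the function is for 3 objectives and A's
-- indexing key[0], key[1], key[2] raises IndexError on most such inputs (B always raises there).
def Pre_get_non_dominated_solutions (solution_reduite : List (List Int × List Int)) : Prop :=
  ∀ p ∈ solution_reduite, 3 ≤ p.1.length
instance (solution_reduite : List (List Int × List Int)) : Decidable (Pre_get_non_dominated_solutions solution_reduite) := by unfold Pre_get_non_dominated_solutions; infer_instance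

def pvWitness_get_non_dominated_solutions : (List (List Int × List Int)) :=
  [([1, 2, 3], [7]), ([0, 5, 1], [8])]

def Spec_get_non_dominated_solutions (solution_reduite : List (List Int × List Int)) (out : List (List Int × List Int)) : Prop := out = get_non_dominated_solutions_alt solution_reduite
instance (solution_reduite : List (List Int × List Int)) (out : List (List Int × List Int)) : Decidable (Spec_get_non_dominated_solutions solution_reduite out) := by unfold Spec_get_non_dominated_solutions; infer_instance

-- ===== CLAIM (what is proved, stated in full; the proofs are below) =====
def Claim_equal_get_non_dominated_solutions : Prop := ∀ (solution_reduite : List (List Int × List Int)), Dom_get_non_dominated_solutions solution_reduite → Pre_get_non_dominated_solutions solution_reduite → Spec_get_non_dominated_solutions solution_reduite (get_non_dominated_solutions solution_reduite)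

-- ===== LEMMAS AND PROOFS =====
theorem pvUpperAux_spec (stair : List (Int × Int)) (v lo hi : Int)
    (h0 : 0 ≤ lo) (hlh : lo ≤ hi) (hhi : hi ≤ stair.length)
    (hmono : ∀ p q : Nat, p ≤ q → q < stair.length → (stair.getD p (0,0)).1 ≤ (stair.getD q (0,0)).1)
    (hlo : ∀ k : Nat, k < lo.toNat → k < stair.length → (stair.getD k (0,0)).1 ≤ v)
    (hhiv : ∀ k : Nat, hi.toNat ≤ k → k < stair.length → v < (stair.getD k (0,0)).1) :
    0 ≤ pvUpperAux stair v lo hi ∧ pvUpperAux stair v lo hi ≤ stair.length ∧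
      (∀ k : Nat, k < (pvUpperAux stair v lo hi).toNat → k < stair.length → (stair.getD k (0,0)).1 ≤ v) ∧
      (∀ k : Nat, (pvUpperAux stair v lo hi).toNat ≤ k → k < stair.length → v < (stair.getD k (0,0)).1) := by
  induction lo, hi using pvUpperAux.induct stair v with
  | case1 lo hi h mid hle ih =>
    have h2 := (PySem.Int.floordiv_eq_iff_of_pos (a := lo + hi) (b := 2) (q := mid) (by omega)).mp rfl
    have hmidlen : mid.toNat < stair.length := by omega
    have hget : PySem.List.pyGetD stair mid (0,0) = stair.getD mid.toNat (0,0) := by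
      rw [show mid = ((mid.toNat : Nat) : Int) from by omega, PySem.List.pyGetD_natCast]
      congr 2
      omega
    rw [pvUpperAux, dif_pos h, if_pos hle]
    refine ih (by omega) (by omega) hhi ?_ hhiv
    intro k hk hklen
    exact (hmono k mid.toNat (by omega) hmidlen).trans (hget ▸ hle)
  | case2 lo hi h mid hgt ih =>
    have h2 := (PySem.Int.floordiv_eq_iff_of_pos (a := lo + hi) (b := 2) (q := mid) (by omega)).mp rfl
    have hmidlen : mid.toNat < stair.length := by omega
    have hget : PySem.List.pyGetD stair mid (0,0) = stair.getD mid.toNat (0,0) := by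
      rw [show mid = ((mid.toNat : Nat) : Int) from by omega, PySem.List.pyGetD_natCast]
      congr 2
      omega
    rw [pvUpperAux, dif_pos h, if_neg hgt]
    refine ih h0 (by omega) (by omega) hlo ?_
    intro k hk hklen
    exact (not_le.mp (hget ▸ hgt)).trans_le (hmono mid.toNat k hk hklen)
  | case3 lo hi h =>
    rw [pvUpperAux, dif_neg h]
    exact ⟨h0, by omega, hlo, fun k hk hklen => hhiv k (by omega) hklen⟩

theorem pvLowerAux_spec (stair : List (Int × Int)) (v lo hi : Int)
    (h0 : 0 ≤ lo) (hlh : lo ≤ hi) (hhi : hi ≤ stair.length)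
    (hmono : ∀ p q : Nat, p ≤ q → q < stair.length → (stair.getD p (0,0)).1 ≤ (stair.getD q (0,0)).1)
    (hlo : ∀ k : Nat, k < lo.toNat → k < stair.length → (stair.getD k (0,0)).1 < v)
    (hhiv : ∀ k : Nat, hi.toNat ≤ k → k < stair.length → v ≤ (stair.getD k (0,0)).1) :
    0 ≤ pvLowerAux stair v lo hi ∧ pvLowerAux stair v lo hi ≤ stair.length ∧
      (∀ k : Nat, k < (pvLowerAux stair v lo hi).toNat → k < stair.length → (stair.getD k (0,0)).1 < v) ∧
      (∀ k : Nat, (pvLowerAux stair v lo hi).toNat ≤ k → k < stair.length → v ≤ (stair.getD k (0,0)).1) := by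
  induction lo, hi using pvLowerAux.induct stair v with
  | case1 lo hi h mid hle ih =>
    have h2 := (PySem.Int.floordiv_eq_iff_of_pos (a := lo + hi) (b := 2) (q := mid) (by omega)).mp rfl
    have hmidlen : mid.toNat < stair.length := by omega
    have hget : PySem.List.pyGetD stair mid (0,0) = stair.getD mid.toNat (0,0) := by
      rw [show mid = ((mid.toNat : Nat) : Int) from by omega, PySem.List.pyGetD_natCast]
      congr 2
      omega
    rw [pvLowerAux, dif_pos h, if_pos hle]
    refine ih (by omega) (by omega) hhi ?_ hhiv
    intro k hk hklen
    exact lt_of_le_of_lt (hmono k mid.toNat (by omega) hmidlen) (hget ▸ hle)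
  | case2 lo hi h mid hgt ih =>
    have h2 := (PySem.Int.floordiv_eq_iff_of_pos (a := lo + hi) (b := 2) (q := mid) (by omega)).mp rfl
    have hmidlen : mid.toNat < stair.length := by omega
    have hget : PySem.List.pyGetD stair mid (0,0) = stair.getD mid.toNat (0,0) := by
      rw [show mid = ((mid.toNat : Nat) : Int) from by omega, PySem.List.pyGetD_natCast]
      congr 2
      omega
    rw [pvLowerAux, dif_pos h, if_neg hgt]
    refine ih h0 (by omega) (by omega) hlo ?_
    intro k hk hklen
    exact le_trans (not_lt.mp (hget ▸ hgt)) (hmono mid.toNat k hk hklen)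
  | case3 lo hi h =>
    rw [pvLowerAux, dif_neg h]
    exact ⟨h0, by omega, hlo, fun k hk hklen => hhiv k (by omega) hklen⟩

theorem pvPruneHi_spec (stair : List (Int × Int)) (d lo : Int) (h0 : 0 ≤ lo) (hlen : lo ≤ stair.length) :
    lo ≤ pvPruneHi stair d lo ∧ pvPruneHi stair d lo ≤ stair.length ∧
      (∀ k : Nat, lo.toNat ≤ k → k < (pvPruneHi stair d lo).toNat → k < stair.length → d ≤ (stair.getD k (0,0)).2) ∧
      ((pvPruneHi stair d lo).toNat < stair.length → (stair.getD (pvPruneHi stair d lo).toNat (0,0)).2 < d) := by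
  induction lo using pvPruneHi.induct stair d with
  | case1 hi h ih =>
    have hlenX : hi < (stair.length : Int) := by simpa [PySem.List.len_eq] using h.1
    have hget : PySem.List.pyGetD stair hi (0,0) = stair.getD hi.toNat (0,0) := by
      rw [show hi = ((hi.toNat : Nat) : Int) from by omega, PySem.List.pyGetD_natCast]
      congr 2
      omega
    rw [pvPruneHi, dif_pos h]
    obtain ⟨ih1, ih2, ih3, ih4⟩ := ih (by omega) (by omega)
    refine ⟨by omega, ih2, ?_, ih4⟩
    intro k hk1 hk2 hk3
    by_cases hke : k = hi.toNat
    · subst hke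
      exact hget ▸ h.2
    · exact ih3 k (by omega) hk2 hk3
  | case2 hi h =>
    rw [pvPruneHi, dif_neg h]
    rw [not_and_or] at h
    refine ⟨le_refl _, by omega, fun k hk1 hk2 _ => by omega, ?_⟩
    intro hlt
    rcases h with h | h
    · simp [PySem.List.len_eq] at h
      omega
    · have hget : PySem.List.pyGetD stair hi (0,0) = stair.getD hi.toNat (0,0) := by
        rw [show hi = ((hi.toNat : Nat) : Int) from by omega, PySem.List.pyGetD_natCast]
        congr 2
        omega
      exact not_le.mp (hget ▸ h)

def pvInv (stair : List (Int × Int)) : Prop :=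
  stair.Pairwise (fun u v => u.1 < v.1 ∧ v.2 < u.2)

def pvCovers (stair : List (Int × Int)) (b d : Int) : Prop :=
  ∃ u ∈ stair, u.1 ≤ b ∧ u.2 ≤ d

theorem pvInv_getD {stair : List (Int × Int)} (hinv : pvInv stair) (p q : Nat) (hpq : p < q)
    (hq : q < stair.length) :
    (stair.getD p (0,0)).1 < (stair.getD q (0,0)).1 ∧ (stair.getD q (0,0)).2 < (stair.getD p (0,0)).2 := by
  rw [List.getD_eq_getElem stair (0,0) (by omega), List.getD_eq_getElem stair (0,0) hq]
  exact List.pairwise_iff_getElem.mp hinv p q (by omega) hq hpq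

theorem pvInv_mono {stair : List (Int × Int)} (hinv : pvInv stair) :
    ∀ p q : Nat, p ≤ q → q < stair.length → (stair.getD p (0,0)).1 ≤ (stair.getD q (0,0)).1 := by
  intro p q hpq hq
  rcases Nat.lt_or_ge p q with h | h
  · exact le_of_lt (pvInv_getD hinv p q h hq).1
  · have : p = q := by omega
    subst this
    exact le_refl _

theorem pvUpper_spec (stair : List (Int × Int)) (v : Int) (hinv : pvInv stair) :
    0 ≤ pvUpper stair v ∧ pvUpper stair v ≤ stair.length ∧
      (∀ k : Nat, k < (pvUpper stair v).toNat → k < stair.length → (stair.getD k (0,0)).1 ≤ v) ∧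
      (∀ k : Nat, (pvUpper stair v).toNat ≤ k → k < stair.length → v < (stair.getD k (0,0)).1) := by
  have := pvUpperAux_spec stair v 0 (stair.length) (by omega) (by omega) (by omega)
    (pvInv_mono hinv) (by omega) (by intro k hk hk'; omega)
  simpa [pvUpper, PySem.List.len_eq] using this

theorem pvLower_spec (stair : List (Int × Int)) (v : Int) (hinv : pvInv stair) :
    0 ≤ pvLower stair v ∧ pvLower stair v ≤ stair.length ∧
      (∀ k : Nat, k < (pvLower stair v).toNat → k < stair.length → (stair.getD k (0,0)).1 < v) ∧
      (∀ k : Nat, (pvLower stair v).toNat ≤ k → k < stair.length → v ≤ (stair.getD k (0,0)).1) := by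
  have := pvLowerAux_spec stair v 0 (stair.length) (by omega) (by omega) (by omega)
    (pvInv_mono hinv) (by omega) (by intro k hk hk'; omega)
  simpa [pvLower, PySem.List.len_eq] using this

-- the 'pos >= 0 and stair[pos][1] <= d' test is exactly 2D dominance against the staircase
theorem pvHit_iff (stair : List (Int × Int)) (b d : Int) (hinv : pvInv stair) :
    ((decide (0 ≤ pvUpper stair b - 1) &&
      decide ((PySem.List.pyGetD stair (pvUpper stair b - 1) (0, 0)).2 ≤ d)) = true)
      ↔ pvCovers stair b d := by
  obtain ⟨h0, hlen, hbelow, habove⟩ := pvUpper_spec stair b hinv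
  set r := pvUpper stair b with hr
  constructor
  · rintro h
    simp only [Bool.and_eq_true, decide_eq_true_eq] at h
    obtain ⟨hpos, hd⟩ := h
    have hget : PySem.List.pyGetD stair (r - 1) (0,0) = stair.getD (r-1).toNat (0,0) := by
      rw [show r - 1 = (((r-1).toNat : Nat) : Int) from by omega, PySem.List.pyGetD_natCast]
      congr 2
      omega
    rw [hget] at hd
    have hrlen : (r-1).toNat < stair.length := by omega
    refine ⟨stair.getD (r-1).toNat (0,0), ?_, ?_, hd⟩
    · rw [List.getD_eq_getElem stair (0,0) hrlen]
      exact List.getElem_mem _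
    · exact hbelow _ (by omega) hrlen
  · rintro ⟨u, hu, hub, hud⟩
    obtain ⟨k, hk, hke⟩ := List.mem_iff_getElem.mp hu
    have hgetk : stair.getD k (0,0) = u := by rw [List.getD_eq_getElem stair (0,0) hk, hke]
    have hklt : k < r.toNat := by
      by_contra hc
      exact absurd hub (not_le.mpr (hgetk ▸ habove k (by omega) hk))
    have hpos : 0 ≤ r - 1 := by omega
    have hrlen : (r-1).toNat < stair.length := by omega
    have hget : PySem.List.pyGetD stair (r - 1) (0,0) = stair.getD (r-1).toNat (0,0) := by
      rw [show r - 1 = (((r-1).toNat : Nat) : Int) from by omega, PySem.List.pyGetD_natCast]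
      congr 2
      omega
    simp only [Bool.and_eq_true, decide_eq_true_eq]
    refine ⟨hpos, ?_⟩
    rw [hget]
    rcases Nat.lt_or_ge k (r-1).toNat with hlt | hge
    · exact le_trans (le_of_lt (hgetk ▸ (pvInv_getD hinv k (r-1).toNat hlt hrlen).2)) hud
    · have : k = (r-1).toNat := by omega
      subst this
      exact hgetk ▸ hud

-- replacing stair[lo:hi] by [(b,d)] keeps the staircase strictly ordered and makes it cover
-- exactly what it covered before plus (b, d)
theorem pvUpdate_spec (stair : List (Int × Int)) (b d : Int) (hinv : pvInv stair)
    (hnc : ¬ pvCovers stair b d) :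
    pvInv (stair.take (pvLower stair b).toNat ++ [(b, d)] ++ stair.drop (pvPruneHi stair d (pvLower stair b)).toNat) ∧
    (∀ B D : Int, pvCovers (stair.take (pvLower stair b).toNat ++ [(b, d)] ++ stair.drop (pvPruneHi stair d (pvLower stair b)).toNat) B D
      ↔ (pvCovers stair B D ∨ (b ≤ B ∧ d ≤ D))) := by
  obtain ⟨hL0, hLlen, hLlt, hLge⟩ := pvLower_spec stair b hinv
  obtain ⟨hHlo, hHlen, hHmid, hHend⟩ := pvPruneHi_spec stair d (pvLower stair b) hL0 hLlen
  set L := (pvLower stair b).toNat with hLdef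
  set H := (pvPruneHi stair d (pvLower stair b)).toNat with hHdef
  have hLH : L ≤ H := by omega
  have hHle : H ≤ stair.length := by omega
  -- elementwise facts
  have hgetE : ∀ k : Nat, (hk : k < stair.length) → stair.getD k (0,0) = stair[k] :=
    fun k hk => List.getD_eq_getElem stair (0,0) hk
  have htk : ∀ u ∈ stair.take L, u.1 < b ∧ d < u.2 := by
    intro u hu
    obtain ⟨j, hj, hje⟩ := List.mem_take_iff_getElem.mp hu
    have hjlen : j < stair.length := by omega
    have h1 : u.1 < b := by
      have := hLlt j (by omega) hjlen
      rwa [hgetE j hjlen, hje] at this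
    refine ⟨h1, ?_⟩
    by_contra hc
    exact hnc ⟨u, List.mem_of_mem_take hu, le_of_lt h1, by omega⟩
  have hdr : ∀ u ∈ stair.drop H, b < u.1 ∧ u.2 < d := by
    intro u hu
    obtain ⟨j, hj, hje⟩ := List.mem_drop_iff_getElem.mp hu
    have hHlt : H < stair.length := by omega
    have hEnd : (stair.getD H (0,0)).2 < d := hHend (by omega)
    have h2 : u.2 < d := by
      rcases Nat.eq_or_lt_of_le (Nat.le_add_right H j) with he | hlt
      · have hj0 : j = 0 := by omega
        subst hj0
        rw [hgetE H hHlt] at hEnd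
        rw [← hje]
        simpa using hEnd
      · have := (pvInv_getD hinv H (H + j) hlt (by omega)).2
        rw [hgetE H hHlt, hgetE (H+j) (by omega)] at this
        rw [← hje]
        rw [hgetE H hHlt] at hEnd
        exact lt_trans this hEnd
    have h1b : b ≤ u.1 := by
      have := hLge (H + j) (by omega) (by omega)
      rwa [hgetE (H+j) (by omega), hje] at this
    refine ⟨?_, h2⟩
    rcases lt_or_eq_of_le h1b with h | h
    · exact h
    · exact absurd ⟨u, List.mem_of_mem_drop hu, le_of_eq h.symm, le_of_lt h2⟩ hnc
  constructor
  · -- pairwise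
    unfold pvInv
    simp only [List.append_assoc, List.pairwise_append, List.pairwise_cons, List.cons_append,
      List.nil_append, List.mem_cons]
    refine ⟨hinv.sublist (List.take_sublist _ _), ⟨fun u hu => hdr u hu, hinv.sublist (List.drop_sublist _ _)⟩, ?_⟩
    intro x hx y hy
    rcases hy with hy | hy
    · subst hy
      exact htk x hx
    · obtain ⟨hx1, hx2⟩ := htk x hx
      obtain ⟨hy1, hy2⟩ := hdr y hy
      exact ⟨lt_trans hx1 hy1, lt_trans hy2 hx2⟩
  · intro B D
    constructor
    · rintro ⟨u, hu, hub, hud⟩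
      simp only [List.append_assoc, List.mem_append, List.mem_singleton] at hu
      rcases hu with hu | hu | hu
      · exact Or.inl ⟨u, List.mem_of_mem_take hu, hub, hud⟩
      · subst hu
        exact Or.inr ⟨hub, hud⟩
      · exact Or.inl ⟨u, List.mem_of_mem_drop hu, hub, hud⟩
    · rintro (⟨u, hu, hub, hud⟩ | ⟨hb, hd⟩)
      · obtain ⟨k, hk, hke⟩ := List.mem_iff_getElem.mp hu
        rcases Nat.lt_or_ge k L with hkL | hkL
        · refine ⟨u, ?_, hub, hud⟩
          simp only [List.append_assoc, List.mem_append]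
          exact Or.inl (List.mem_take_iff_getElem.mpr ⟨k, by omega, hke⟩)
        · rcases Nat.lt_or_ge k H with hkH | hkH
          · -- u was pruned: (b,d) dominates it
            refine ⟨(b, d), ?_, ?_, ?_⟩
            · simp only [List.append_assoc, List.mem_append, List.mem_singleton]
              exact Or.inr (Or.inl trivial)
            · have := hLge k (by omega) hk
              rw [hgetE k hk, hke] at this
              exact le_trans this hub
            · have := hHmid k (by omega) (by omega) hk
              rw [hgetE k hk, hke] at this
              exact le_trans this hud
          · refine ⟨u, ?_, hub, hud⟩
            simp only [List.append_assoc, List.mem_append, List.mem_singleton]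
            refine Or.inr (Or.inr (List.mem_drop_iff_getElem.mpr ⟨k - H, by omega, ?_⟩))
            have hx : H + (k - H) = k := by omega
            simp only [hx]
            exact hke
      · refine ⟨(b, d), ?_, hb, hd⟩
        simp only [List.append_assoc, List.mem_append, List.mem_singleton]
        exact Or.inr (Or.inl trivial)

def pvSeen (P : List (Int × (Int × Int × Int))) (b d : Int) : Prop :=
  ∃ e ∈ P, e.2.2.1 ≤ b ∧ e.2.2.2 ≤ d

def pvRep (stair : List (Int × Int)) (P : List (Int × (Int × Int × Int))) : Prop :=
  ∀ b d : Int, pvCovers stair b d ↔ pvSeen P b d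

def pvFlagVal (cnt : PySem.Dict (Int × Int × Int) Int) (full : List (Int × (Int × Int × Int)))
    (e : Int × (Int × Int × Int)) : Bool :=
  decide (1 < cnt.getD e.2 0) ||
    decide (∃ f ∈ full, pvKey f < pvKey e ∧ f.2.2.1 ≤ e.2.2.1 ∧ f.2.2.2 ≤ e.2.2.2)

def pvTrip (k : List Int) : Int × Int × Int :=
  (PySem.List.pyGetD k 0 0, PySem.List.pyGetD k 1 0, -(PySem.List.pyGetD k 2 0))

abbrev pvBeats (s t : Int × Int × Int) : Prop :=
  s.1 ≤ t.1 ∧ s.2.1 ≤ t.2.1 ∧ s.2.2 ≤ t.2.2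

theorem pvKey_eq_iff (s t : Int × (Int × Int × Int)) : pvKey s = pvKey t ↔ s.2 = t.2 := by
  unfold pvKey
  rw [toLex_inj, Prod.ext_iff, toLex_inj, Prod.ext_iff]
  constructor
  · rintro ⟨h1, h2, h3⟩
    exact Prod.ext_iff.mpr ⟨h1, Prod.ext_iff.mpr ⟨h2, h3⟩⟩
  · intro h
    rw [h]
    exact ⟨rfl, rfl, rfl⟩

-- the whole sweep writes exactly the flag values pvFlagVal
theorem pvSweep_aux (cnt : PySem.Dict (Int × Int × Int) Int)
    (full : List (Int × (Int × Int × Int)))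
    (hpw : full.Pairwise (fun e f => pvKey e ≤ pvKey f))
    (hcnt : ∀ t : Int × Int × Int, cnt.getD t 0 = ((full.map (·.2)).count t : Int)) :
    ∀ (suffix pre : List (Int × (Int × Int × Int))) (doml : List Bool) (stair : List (Int × Int)),
      full = pre ++ suffix → pvInv stair → pvRep stair pre →
      (suffix.foldl (pvSweepStep cnt) (doml, stair)).1 =
        suffix.foldl (fun dl e => if pvFlagVal cnt full e then dl.set e.1.toNat true else dl) doml := by
  intro suffix
  induction suffix with
  | nil => intro pre doml stair _ _ _; rfl
  | cons e rest ih =>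
    intro pre doml stair hfull hinv hrep
    have hsplit : ∀ f ∈ pre, pvKey f ≤ pvKey e := by
      intro f hf
      have := (List.pairwise_append.mp (hfull ▸ hpw)).2.2 f hf e (by simp)
      exact this
    have hrest : ∀ f ∈ rest, pvKey e ≤ pvKey f :=
      fun f hf => (List.pairwise_cons.mp (List.pairwise_append.mp (hfull ▸ hpw)).2.1).1 f hf
    set b := e.2.2.1 with hb
    set d := e.2.2.2 with hd
    have hhit := pvHit_iff stair b d hinv
    set hit := (decide (0 ≤ pvUpper stair b - 1) &&
      decide ((PySem.List.pyGetD stair (pvUpper stair b - 1) (0, 0)).2 ≤ d)) with hhitdef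
    -- the written flag is the global flag value
    have hflag : (hit || decide (1 < cnt.getD e.2 0)) = pvFlagVal cnt full e := by
      unfold pvFlagVal
      rcases hX : decide (1 < cnt.getD e.2 0) with _ | _
      · simp only [Bool.or_false, Bool.false_or]
        rcases hY : hit with _ | _
        · symm
          rw [decide_eq_false_iff_not]
          rintro ⟨f, hf, hklt, hfb, hfd⟩
          have hfpre : f ∈ pre := by
            rcases List.mem_append.mp (hfull ▸ hf) with h | h
            · exact h
            · rcases List.mem_cons.mp h with h | h
              · subst h; exact absurd hklt (lt_irrefl _)
              · exact absurd hklt (not_lt.mpr (hrest f h))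
          have : pvCovers stair b d := (hrep b d).mpr ⟨f, hfpre, hfb, hfd⟩
          rw [← hhit, hY] at this
          exact Bool.false_ne_true this
        · symm
          rw [decide_eq_true_eq]
          have hcov : pvCovers stair b d := hhit.mp hY
          obtain ⟨f, hfpre, hfb, hfd⟩ := (hrep b d).mp hcov
          refine ⟨f, by rw [hfull]; exact List.mem_append_left _ hfpre, ?_, hfb, hfd⟩
          rcases lt_or_eq_of_le (hsplit f hfpre) with h | h
          · exact h
          · -- equal keys: triple duplicated, contradicting the count test
            exfalso
            have hft : f.2 = e.2 := (pvKey_eq_iff f e).mp h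
            have : 2 ≤ (full.map (·.2)).count e.2 := by
              rw [hfull]
              simp only [List.map_append, List.map_cons, List.count_append, List.count_cons_self]
              have h1 : 1 ≤ (pre.map (·.2)).count e.2 :=
                List.one_le_count_iff.mpr (hft ▸ List.mem_map_of_mem hfpre)
              omega
            rw [decide_eq_false_iff_not] at hX
            rw [hcnt e.2] at hX
            omega
      · simp
    -- the new staircase state
    rcases hY : hit with _ | _
    · -- no hit: staircase updated
      have hnc : ¬ pvCovers stair b d := by
        rw [← hhit, hY]
        exact Bool.false_ne_true
      obtain ⟨hinv', hcov'⟩ := pvUpdate_spec stair b d hinv hnc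
      have hrep' : pvRep (stair.take (pvLower stair b).toNat ++ [(b, d)] ++
          stair.drop (pvPruneHi stair d (pvLower stair b)).toNat) (pre ++ [e]) := by
        intro B D
        rw [hcov' B D]
        constructor
        · rintro (h | ⟨h1, h2⟩)
          · obtain ⟨f, hf, h⟩ := (hrep B D).mp h
            exact ⟨f, List.mem_append_left _ hf, h⟩
          · exact ⟨e, List.mem_append_right _ (by simp), h1, h2⟩
        · rintro ⟨f, hf, h1, h2⟩
          rcases List.mem_append.mp hf with hf | hf
          · exact Or.inl ((hrep B D).mpr ⟨f, hf, h1, h2⟩)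
          · rcases List.mem_singleton.mp hf with rfl
            exact Or.inr ⟨h1, h2⟩
      have hstep : pvSweepStep cnt (doml, stair) e =
          (if pvFlagVal cnt full e then doml.set e.1.toNat true else doml,
            stair.take (pvLower stair b).toNat ++ [(b, d)] ++
              stair.drop (pvPruneHi stair d (pvLower stair b)).toNat) := by
        rw [pvSweepStep]
        simp only [← hhitdef, ← hb, ← hd, hY]
        simp [hY, ← hflag]
      rw [List.foldl_cons, List.foldl_cons, hstep]
      exact ih (pre ++ [e]) _ _ (by rw [hfull, List.append_assoc]; rfl) hinv' hrep'
    · -- hit: staircase unchanged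
      have hcov : pvCovers stair b d := hhit.mp hY
      have hrep' : pvRep stair (pre ++ [e]) := by
        intro B D
        rw [hrep B D]
        constructor
        · rintro ⟨f, hf, h⟩
          exact ⟨f, List.mem_append_left _ hf, h⟩
        · rintro ⟨f, hf, h1, h2⟩
          rcases List.mem_append.mp hf with hf | hf
          · exact ⟨f, hf, h1, h2⟩
          · rcases List.mem_singleton.mp hf with rfl
            obtain ⟨u, hu, hub, hud⟩ := hcov
            exact (hrep B D).mp ⟨u, hu, le_trans hub h1, le_trans hud h2⟩
      have hstep : pvSweepStep cnt (doml, stair) e =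
          (if pvFlagVal cnt full e then doml.set e.1.toNat true else doml, stair) := by
        rw [pvSweepStep]
        simp only [← hhitdef, ← hb, ← hd, hY]
        simp [hY, ← hflag]
      rw [List.foldl_cons, List.foldl_cons, hstep]
      exact ih (pre ++ [e]) _ _ (by rw [hfull, List.append_assoc]; rfl) hinv hrep'

theorem pvFoldSet_getD (flag : (Int × (Int × Int × Int)) → Bool) :
    ∀ (L : List (Int × (Int × Int × Int))) (doml : List Bool) (i : Nat),
      (L.foldl (fun dl e => if flag e then dl.set e.1.toNat true else dl) doml).getD i false =
        (doml.getD i false ||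
          L.any (fun e => decide (e.1.toNat = i) && decide (i < doml.length) && flag e)) := by
  intro L
  induction L with
  | nil => intro doml i; simp
  | cons e t ih =>
    intro doml i
    rw [List.foldl_cons, List.any_cons]
    rcases hf : flag e with _ | _
    · rw [if_neg (by simp : ¬ (false = true))]
      rw [ih doml i]
      simp
    · rw [if_pos (by simp)]
      rw [ih _ i]
      have hlen : (doml.set e.1.toNat true).length = doml.length := List.length_set
      rw [hlen]
      have hget : (doml.set e.1.toNat true).getD i false =
          ((decide (e.1.toNat = i) && decide (i < doml.length)) || doml.getD i false) := by
        rcases Nat.decEq e.1.toNat i with h | h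
        · simp [List.getD_eq_getElem?_getD, h]
        · subst h
          by_cases hl : e.1.toNat < doml.length
        
          · simp [List.getD_eq_getElem?_getD, hl]
          · simp [List.getD_eq_getElem?_getD, hl]
      rw [hget]
      cases hd : doml.getD i false <;> cases h1 : decide (e.1.toNat = i) <;> cases h2 : decide (i < doml.length) <;> simp

def pvTKey (t : Int × Int × Int) : Lex (Int × Lex (Int × Int)) :=
  toLex (t.1, toLex (t.2.1, t.2.2))

theorem pvTKey_lt_iff (s t : Int × Int × Int) :
    pvTKey s < pvTKey t ↔
      (s.1 < t.1 ∨ (s.1 = t.1 ∧ (s.2.1 < t.2.1 ∨ (s.2.1 = t.2.1 ∧ s.2.2 < t.2.2)))) := by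
  unfold pvTKey
  rw [Prod.Lex.lt_iff]
  simp only [ofLex_toLex]
  rw [Prod.Lex.lt_iff]
  simp only [ofLex_toLex]

theorem pvCount_two_iff (ts : List (Int × Int × Int)) (i : Nat) (hi : i < ts.length) :
    1 < ts.count ts[i] ↔ ∃ j, ∃ hj : j < ts.length, j ≠ i ∧ ts[j] = ts[i] := by
  have hperm := (List.getElem_cons_eraseIdx_perm hi).symm
  rw [hperm.count_eq, List.count_cons_self]
  constructor
  · intro h
    have hmem : ts[i] ∈ ts.eraseIdx i := by
      rw [← List.count_pos_iff]
      omega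
    obtain ⟨j, hj, hji, hje⟩ := List.mem_eraseIdx_iff_getElem.mp hmem
    exact ⟨j, hj, hji, hje⟩
  · rintro ⟨j, hj, hji, hje⟩
    have hmem : ts[i] ∈ ts.eraseIdx i := List.mem_eraseIdx_iff_getElem.mpr ⟨j, hj, hji, hje⟩
    have := List.count_pos_iff.mpr hmem
    omega

-- the order-free characterisation of the sweep flag: dominated by some OTHER entry
theorem pvFlag_iff (ts : List (Int × Int × Int)) (i : Nat) (hi : i < ts.length) :
    ((1 < ts.count ts[i]) ∨
      ∃ j, ∃ hj : j < ts.length, pvTKey ts[j] < pvTKey ts[i] ∧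
        ts[j].2.1 ≤ ts[i].2.1 ∧ ts[j].2.2 ≤ ts[i].2.2) ↔
      (∃ j, ∃ hj : j < ts.length, j ≠ i ∧ pvBeats ts[j] ts[i]) := by
  constructor
  · rintro (h | ⟨j, hj, hlt, hb, hd⟩)
    · obtain ⟨j, hj, hji, hje⟩ := (pvCount_two_iff ts i hi).mp h
      exact ⟨j, hj, hji, by rw [hje]; exact ⟨le_refl _, le_refl _, le_refl _⟩⟩
    · have ha : ts[j].1 ≤ ts[i].1 := by
        rcases (pvTKey_lt_iff _ _).mp hlt with h | ⟨h, _⟩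
        · exact le_of_lt h
        · exact le_of_eq h
      have hne : j ≠ i := by
        intro he
        subst he
        exact absurd hlt (lt_irrefl _)
      exact ⟨j, hj, hne, ha, hb, hd⟩
  · rintro ⟨j, hj, hne, ha, hb, hd⟩
    by_cases he : ts[j] = ts[i]
    · exact Or.inl ((pvCount_two_iff ts i hi).mpr ⟨j, hj, hne, he⟩)
    · refine Or.inr ⟨j, hj, ?_, hb, hd⟩
      rw [pvTKey_lt_iff]
      rcases lt_or_eq_of_le ha with h1 | h1
      · exact Or.inl h1
      · refine Or.inr ⟨h1, ?_⟩
        rcases lt_or_eq_of_le hb with h2 | h2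
        · exact Or.inl h2
        · refine Or.inr ⟨h2, ?_⟩
          rcases lt_or_eq_of_le hd with h3 | h3
          · exact h3
          · exact absurd (Prod.ext_iff.mpr ⟨h1, Prod.ext_iff.mpr ⟨h2, h3⟩⟩) he

theorem pvADomCond_eq (obj_val : List (List Int)) (i j : Int) :
    pvADomCond obj_val 3 i j =
      decide (pvBeats (pvTrip (PySem.List.pyGetD obj_val j []))
                     (pvTrip (PySem.List.pyGetD obj_val i []))) := by
  unfold pvADomCond pvBeats pvTrip
  rw [show PySem.List.pyRange 0 ((3:Int) - 1) 1 = [0, 1] from by decide]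
  simp only [List.all_cons, List.all_nil, Bool.and_true, ge_iff_le]
  rw [show (3:Int) - 1 = 2 from by norm_num]
  simp only [Bool.decide_and]
  cases h0 : decide (PySem.List.pyGetD (PySem.List.pyGetD obj_val j []) 0 0 ≤ PySem.List.pyGetD (PySem.List.pyGetD obj_val i []) 0 0) <;>
  cases h1 : decide (PySem.List.pyGetD (PySem.List.pyGetD obj_val j []) 1 0 ≤ PySem.List.pyGetD (PySem.List.pyGetD obj_val i []) 1 0) <;>
  cases h2 : decide (PySem.List.pyGetD (PySem.List.pyGetD obj_val i []) 2 0 ≤ PySem.List.pyGetD (PySem.List.pyGetD obj_val j []) 2 0) <;>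
  simp_all

def pvSpecFlag (ts : List (Int × Int × Int)) (i : Nat) : Bool :=
  decide (∃ j, ∃ hj : j < ts.length, j ≠ i ∧ pvBeats ts[j] (ts.getD i (0, 0, 0)))

theorem pvALoop_eq (items : List (List Int × List Int)) (ii : Nat) (hii : ii < items.length) :
    pvADominatedLoop (items.map (·.1)) (PySem.List.len (items.map (·.1))) 3 ↑ii
      = pvSpecFlag (items.map (fun p => pvTrip p.1)) ii := by
  unfold pvADominatedLoop
  have hstep : ∀ l : List Int, l.foldl (fun dom j =>
      if (↑ii : Int) ≠ j then if pvADomCond (items.map (·.1)) 3 ↑ii j then true else dom else dom) false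
      = l.foldl (fun dom j =>
      if (decide ((↑ii : Int) ≠ j) && pvADomCond (items.map (·.1)) 3 ↑ii j) then true else dom) false := by
    intro l
    apply PySem.List.foldl_congr_mem
    intro acc j _
    by_cases hp : (↑ii : Int) = j
    · simp [hp]
    · simp [hp]
  rw [hstep, PySem.List.foldl_if_true_eq, Bool.false_or]
  rw [PySem.List.len_eq, List.length_map, PySem.List.pyRange_zero_nat, List.any_map]
  simp only [pvSpecFlag]
  rw [Bool.eq_iff_iff, List.any_eq_true, decide_eq_true_eq]
  have hgetm : ∀ (jj : Nat) (hjj : jj < items.length),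
      PySem.List.pyGetD (items.map (·.1)) ↑jj [] = (items[jj]'hjj).1 := by
    intro jj hjj
    rw [PySem.List.pyGetD_natCast, List.getD_eq_getElem _ _ (by simpa using hjj), List.getElem_map]
  have hgetT : (items.map fun p => pvTrip p.1).getD ii (0,0,0) = pvTrip items[ii].1 := by
    rw [List.getD_eq_getElem _ _ (by simpa using hii), List.getElem_map]
  constructor
  · rintro ⟨jj, hjj, hcond⟩
    rw [List.mem_range] at hjj
    simp only [Function.comp] at hcond
    rw [Bool.and_eq_true, decide_eq_true_eq] at hcond
    obtain ⟨hne, hc⟩ := hcond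
    rw [pvADomCond_eq, decide_eq_true_eq, hgetm jj hjj, hgetm ii hii] at hc
    refine ⟨jj, by simpa using hjj, fun h => hne (by exact_mod_cast congrArg (Nat.cast (R := Int)) h.symm), ?_⟩
    rw [hgetT]
    simpa [List.getElem_map] using hc
  · rintro ⟨jj, hjj, hne, hdom⟩
    rw [List.length_map] at hjj
    refine ⟨jj, List.mem_range.mpr hjj, ?_⟩
    simp only [Function.comp]
    rw [Bool.and_eq_true, decide_eq_true_eq, pvADomCond_eq, decide_eq_true_eq,
      hgetm jj hjj, hgetm ii hii]
    refine ⟨by intro h; exact hne (by exact_mod_cast h.symm), ?_⟩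
    rw [hgetT] at hdom
    simpa [List.getElem_map] using hdom

def pvAStep (items : List (List Int × List Int)) (nd : PySem.Dict (List Int) (List Int))
    (ii : Nat) : PySem.Dict (List Int) (List Int) :=
  if !(pvSpecFlag (items.map (fun p => pvTrip p.1)) ii) then
    nd.insert (items.getD ii ([], [])).1 (items.getD ii ([], [])).2
  else nd

theorem pvA_char (l : List (List Int × List Int)) :
    get_non_dominated_solutions l =
      ((List.range (PySem.Dict.ofList l).items.length).filter
        (fun i => !pvSpecFlag ((PySem.Dict.ofList l).items.map (fun p => pvTrip p.1)) i)).map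
        (fun i => (PySem.Dict.ofList l).items.getD i ([], [])) := by
  unfold get_non_dominated_solutions
  dsimp only
  have hkeys : (PySem.Dict.ofList l).keys = (PySem.Dict.ofList l).items.map (·.1) := rfl
  have hnd : ((PySem.Dict.ofList l).items.map (·.1)).Nodup := by
    rw [← hkeys]; exact PySem.Dict.nodup_keys_ofList l
  set d := PySem.Dict.ofList l with hd
  set items := d.items with hitems
  set ts := items.map (fun p => pvTrip p.1) with hts
  set n := items.length with hn
  rw [hkeys, PySem.List.len_eq, List.length_map]
  have hcongr : (PySem.List.pyRange 0 (↑n) 1).foldl (fun nd i =>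
        if !(pvADominatedLoop (items.map (·.1)) ↑n 3 i) then
          nd.insert (PySem.List.pyGetD (items.map (·.1)) i [])
            (d.getD (PySem.List.pyGetD (items.map (·.1)) i []) [])
        else nd) PySem.Dict.empty
      = (PySem.List.pyRange 0 (↑n) 1).foldl (fun nd i => pvAStep items nd i.toNat)
          PySem.Dict.empty := by
    apply PySem.List.foldl_congr_mem
    intro acc i hi
    rw [PySem.List.mem_pyRange_one] at hi
    have hii : i.toNat < n := by omega
    have hcast : (↑i.toNat : Int) = i := by omega
    unfold pvAStep
    rw [← hts]
    have hl := pvALoop_eq items i.toNat hii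
    rw [PySem.List.len_eq, List.length_map, ← hn, ← hts, hcast] at hl
    rw [hl]
    have hgetm : PySem.List.pyGetD (items.map (·.1)) i [] = (items.getD i.toNat ([], [])).1 := by
      conv_lhs => rw [← hcast, PySem.List.pyGetD_natCast]
      rw [List.getD_eq_getElem _ _ (by simpa using hii),
        List.getD_eq_getElem _ _ hii, List.getElem_map]
    rw [hgetm]
    have hgv : d.getD (items.getD i.toNat ([], [])).1 [] = (items.getD i.toNat ([], [])).2 := by
      apply PySem.Dict.getD_of_mem_items
      · rw [List.getD_eq_getElem _ _ hii]
        exact List.getElem_mem hii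
      · rw [hkeys]; exact hnd
    rw [hgv]
  rw [hcongr, PySem.List.pyRange_zero_nat, List.foldl_map]
  simp only [Int.toNat_natCast]
  rw [show (fun (x : PySem.Dict (List Int) (List Int)) (y : Nat) => pvAStep items x y)
      = fun x y => (if !(pvSpecFlag ts y) then
          x.insert (items.getD y ([], [])).1 (items.getD y ([], [])).2 else x) from by
    funext x y
    rw [pvAStep, ← hts]]
  rw [PySem.List.foldl_if_eq_foldl_filter]
  rw [PySem.Dict.items_foldl_insert_fresh _ _ _ _ (fun a _ => PySem.Dict.contains_empty _) ?nodup]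
  case nodup =>
    apply List.Nodup.map_on
    · intro x hx y hy hxy
      have hxn : x < n := List.mem_range.mp (List.mem_filter.mp hx).1
      have hyn : y < n := List.mem_range.mp (List.mem_filter.mp hy).1
      rw [List.getD_eq_getElem _ _ hxn, List.getD_eq_getElem _ _ hyn] at hxy
      have : (items.map (·.1))[x]'(by simpa using hxn) = (items.map (·.1))[y]'(by simpa using hyn) := by
        simpa [List.getElem_map] using hxy
      exact (hnd.getElem_inj_iff).mp this
    · exact List.nodup_range.filter _
  rw [show (PySem.Dict.empty : PySem.Dict (List Int) (List Int)).items = [] from rfl,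
    List.nil_append]

theorem pvB_char (l : List (List Int × List Int)) :
    get_non_dominated_solutions_alt l =
      ((List.range (PySem.Dict.ofList l).items.length).filter
        (fun i => !pvSpecFlag ((PySem.Dict.ofList l).items.map (fun p => pvTrip p.1)) i)).map
        (fun i => (PySem.Dict.ofList l).items.getD i ([], [])) := by
  unfold get_non_dominated_solutions_alt
  dsimp only
  have hkeys : (PySem.Dict.ofList l).keys = (PySem.Dict.ofList l).items.map (·.1) := rfl
  have hnd : ((PySem.Dict.ofList l).items.map (·.1)).Nodup := by
    rw [← hkeys]; exact PySem.Dict.nodup_keys_ofList l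
  set items := (PySem.Dict.ofList l).items with hitems
  rw [show (fun (p : List Int × List Int) =>
      (PySem.List.pyGetD p.1 0 0, PySem.List.pyGetD p.1 1 0, -(PySem.List.pyGetD p.1 2 0)))
      = (fun (p : List Int × List Int) => pvTrip p.1) from rfl]
  set ts := items.map (fun p => pvTrip p.1) with hts
  set n := items.length with hn
  set cnt := ts.foldl (fun c t => c.insert t (c.getD t 0 + 1))
    (PySem.Dict.empty : PySem.Dict (Int × Int × Int) Int) with hcntd
  set full := PySem.List.sorted (PySem.List.enumerate ts) pvKey false with hfull
  have hperm : full.Perm (PySem.List.enumerate ts) := PySem.List.sorted_perm _ _ _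
  have hpw : full.Pairwise (fun e f => pvKey e ≤ pvKey f) := PySem.List.sorted_pairwise _ _
  have hpermts : (full.map (·.2)).Perm ts := by
    have := hperm.map (·.2)
    rwa [PySem.List.map_snd_enumerate] at this
  have hcount : ∀ t : Int × Int × Int, cnt.getD t 0 = ((full.map (·.2)).count t : Int) := by
    intro t
    rw [hcntd, PySem.Dict.getD_foldl_insert_add_one, PySem.Dict.getD_empty, zero_add,
      hpermts.count_eq]
  have htslen : ts.length = n := by rw [hts, List.length_map]
  have hsweep := pvSweep_aux cnt full hpw hcount full [] (List.replicate n false) [] rfl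
    List.Pairwise.nil (by intro b d; constructor <;> rintro ⟨x, hx, -⟩ <;> cases hx)
  -- value of the dominated flags
  have hflagB : ∀ i : Nat, i < n →
      (full.foldl (pvSweepStep cnt) (List.replicate n false, [])).1.getD i false
        = pvSpecFlag ts i := by
    intro i hi
    have hits : i < ts.length := by omega
    rw [hsweep, pvFoldSet_getD, List.length_replicate]
    rw [show (List.replicate n false).getD i false = false from by
      rw [List.getD_eq_getElem?_getD, List.getElem?_replicate]
      split <;> rfl]
    rw [Bool.false_or, hperm.any_eq]
    unfold pvSpecFlag
    rw [Bool.eq_iff_iff, List.any_eq_true, decide_eq_true_eq]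
    have hgetd : ts.getD i (0, 0, 0) = ts[i] := List.getD_eq_getElem _ _ hits
    constructor
    · rintro ⟨e, he, hcond⟩
      obtain ⟨k, hk, rfl⟩ := (PySem.List.mem_enumerate_iff ts 0 e).mp he
      simp only [zero_add] at hcond
      rw [Bool.and_eq_true, Bool.and_eq_true, decide_eq_true_eq, decide_eq_true_eq] at hcond
      obtain ⟨⟨hki, -⟩, hfv⟩ := hcond
      rw [Int.toNat_natCast] at hki
      subst hki
      -- unpack pvFlagVal
      unfold pvFlagVal at hfv
      rw [Bool.or_eq_true, decide_eq_true_eq, decide_eq_true_eq] at hfv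
      rw [hgetd]
      apply (pvFlag_iff ts k hits).mp
      rcases hfv with hfv | ⟨f, hf, hlt, hb, hd⟩
      · left
        rw [hcount, hpermts.count_eq] at hfv
        exact_mod_cast hfv
      · right
        obtain ⟨j, hj, rfl⟩ := (PySem.List.mem_enumerate_iff ts 0 f).mp (hperm.subset hf)
        exact ⟨j, hj, hlt, hb, hd⟩
    · intro hspec
      rw [hgetd] at hspec
      have hfv := (pvFlag_iff ts i hits).mpr hspec
      refine ⟨((i : Int), ts[i]), ?_, ?_⟩
      · exact (PySem.List.mem_enumerate_iff ts 0 _).mpr ⟨i, hits, by rw [zero_add]⟩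
      · rw [Bool.and_eq_true, Bool.and_eq_true, decide_eq_true_eq, decide_eq_true_eq]
        refine ⟨⟨by simp, hi⟩, ?_⟩
        unfold pvFlagVal
        rw [Bool.or_eq_true, decide_eq_true_eq, decide_eq_true_eq]
        rcases hfv with hfv | ⟨j, hj, hlt, hb, hd⟩
        · left
          rw [hcount, hpermts.count_eq]
          exact_mod_cast hfv
        · right
          refine ⟨((j : Int), ts[j]), ?_, hlt, hb, hd⟩
          exact hperm.mem_iff.mpr ((PySem.List.mem_enumerate_iff ts 0 _).mpr ⟨j, hj, by rw [zero_add]⟩)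
  -- the output loop
  rw [PySem.List.enumerate_eq_map_pyRange items ([], []), List.foldl_map, PySem.List.len_eq, ← hn]
  have hcongr : (PySem.List.pyRange 0 (↑n) 1).foldl (fun out i =>
        if !(PySem.List.pyGetD (full.foldl (pvSweepStep cnt) (List.replicate n false, [])).1 i false) then
          out.insert (PySem.List.pyGetD items i ([], [])).1 (PySem.List.pyGetD items i ([], [])).2
        else out) PySem.Dict.empty
      = (PySem.List.pyRange 0 (↑n) 1).foldl (fun nd i => pvAStep items nd i.toNat)
          PySem.Dict.empty := by
    apply PySem.List.foldl_congr_mem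
    intro acc i hi
    rw [PySem.List.mem_pyRange_one] at hi
    have hii : i.toNat < n := by omega
    have hcast : (↑i.toNat : Int) = i := by omega
    unfold pvAStep
    rw [← hts]
    have hflg : PySem.List.pyGetD (full.foldl (pvSweepStep cnt) (List.replicate n false, [])).1 i false
        = pvSpecFlag ts i.toNat := by
      conv_lhs => rw [← hcast, PySem.List.pyGetD_natCast]
      exact hflagB i.toNat hii
    rw [hflg]
    have hgi : PySem.List.pyGetD items i ([], []) = items.getD i.toNat ([], []) := by
      conv_lhs => rw [← hcast, PySem.List.pyGetD_natCast]
    rw [hgi]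
  rw [hcongr, PySem.List.pyRange_zero_nat, List.foldl_map]
  simp only [Int.toNat_natCast]
  rw [show (fun (x : PySem.Dict (List Int) (List Int)) (y : Nat) => pvAStep items x y)
      = fun x y => (if !(pvSpecFlag ts y) then
          x.insert (items.getD y ([], [])).1 (items.getD y ([], [])).2 else x) from by
    funext x y
    rw [pvAStep, ← hts]]
  rw [PySem.List.foldl_if_eq_foldl_filter]
  rw [PySem.Dict.items_foldl_insert_fresh _ _ _ _ (fun a _ => PySem.Dict.contains_empty _) ?nodup]
  case nodup =>
    apply List.Nodup.map_on
    · intro x hx y hy hxy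
      have hxn : x < n := List.mem_range.mp (List.mem_filter.mp hx).1
      have hyn : y < n := List.mem_range.mp (List.mem_filter.mp hy).1
      rw [List.getD_eq_getElem _ _ hxn, List.getD_eq_getElem _ _ hyn] at hxy
      have : (items.map (·.1))[x]'(by simpa using hxn) = (items.map (·.1))[y]'(by simpa using hyn) := by
        simpa [List.getElem_map] using hxy
      exact (hnd.getElem_inj_iff).mp this
    · exact List.nodup_range.filter _
  rw [show (PySem.Dict.empty : PySem.Dict (List Int) (List Int)).items = [] from rfl,
    List.nil_append]
-- ===== VERDICT (by name: the statement is the Claim_ definition above) =====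
theorem get_non_dominated_solutions_spec : Claim_equal_get_non_dominated_solutions := by
  intro l _ _
  unfold Spec_get_non_dominated_solutions
  rw [pvA_char, pvB_char]
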